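-- pv_equiv track=rewrite | github.com/mariovas3/comp_vision_repro | gan/utils.py | conv_transpose_dim_formula
-- ===== SOURCE A (Python) =====
-- def conv_transpose_dim_formula(
--     in_dim, kernels, paddings, strides, dilations=None, output_paddings=None
-- ):
--     out = in_dim
--     for i in range(len(kernels)):
--         offset = -2 * paddings[i] + kernels[i]
--         if dilations:
--             offset += (kernels[i] - 1) * (dilations[i] - 1)
--         if output_paddings:
--             offset += output_paddings[i]
--         out = (out - 1) * strides[i] + offset
--     return out
-- ===== SOURCE B (Python) =====
-- def conv_transpose_dim_formula(
--     in_dim, kernels, paddings, strides, dilations=None, output_paddings=None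
-- ):
--     # closed form: out = in_dim * prod(strides) + sum_i c_i * prod(strides after i)
--     n = len(kernels)
--     dil = dilations if dilations else [1] * n
--     opad = output_paddings if output_paddings else [0] * n
--     prod = 1
--     acc = 0
--     for k, p, s, d, op in reversed(list(zip(kernels, paddings, strides, dil, opad))):
--         acc += (-2 * p + k + (k - 1) * (d - 1) + op - s) * prod
--         prod *= s
--     return in_dim * prod + acc
-- ===== Notes on version B (the rewrite author's own statement) =====
-- stated objective: alternative
-- what changed: Replaces A's forward affine recurrence out=(out-1)*s+offset with the algebraic closed form in_dim*prod(strides)+sum of per-layer constants weighted by suffix stride products, computed in one reverse scan over the zipped layer data with normalized dilation/output-padding lists.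
import Mathlib
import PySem

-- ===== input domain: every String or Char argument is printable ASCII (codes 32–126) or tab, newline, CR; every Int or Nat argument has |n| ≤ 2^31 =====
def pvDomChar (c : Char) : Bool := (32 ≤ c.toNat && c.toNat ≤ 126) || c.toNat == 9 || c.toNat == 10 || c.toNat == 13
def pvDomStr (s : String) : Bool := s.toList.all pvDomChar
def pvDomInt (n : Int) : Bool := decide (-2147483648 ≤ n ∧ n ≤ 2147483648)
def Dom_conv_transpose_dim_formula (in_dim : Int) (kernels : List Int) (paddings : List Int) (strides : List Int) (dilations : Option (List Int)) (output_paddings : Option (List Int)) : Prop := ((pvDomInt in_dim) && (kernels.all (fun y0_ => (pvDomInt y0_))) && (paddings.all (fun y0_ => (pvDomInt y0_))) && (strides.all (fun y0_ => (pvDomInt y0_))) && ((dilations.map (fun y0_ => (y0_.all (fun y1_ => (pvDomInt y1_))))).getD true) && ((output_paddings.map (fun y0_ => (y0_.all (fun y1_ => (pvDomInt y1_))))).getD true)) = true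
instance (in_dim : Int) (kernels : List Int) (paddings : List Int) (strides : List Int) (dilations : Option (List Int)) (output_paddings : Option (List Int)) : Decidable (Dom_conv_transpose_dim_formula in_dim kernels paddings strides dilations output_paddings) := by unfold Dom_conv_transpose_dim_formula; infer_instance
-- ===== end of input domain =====

-- B replaces A's forward affine recurrence by the algebraic closed form
-- in_dim * prod(strides) + Σ_i c_i * prod(strides after layer i), computed in one reverse scan.

-- ===== PORT A =====
def conv_transpose_dim_formula (in_dim : Int) (kernels : List Int) (paddings : List Int) (strides : List Int) (dilations : Option (List Int)) (output_paddings : Option (List Int)) : Int :=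
  (PySem.List.pyRange 0 (kernels.length : Int) 1).foldl (fun out i =>
    let offset := -2 * PySem.List.pyGetD paddings i 0 + PySem.List.pyGetD kernels i 0
    let offset := match dilations with          -- 'if dilations:' — None and [] are falsy
      | some l => if l = [] then offset
                  else offset + (PySem.List.pyGetD kernels i 0 - 1) * (PySem.List.pyGetD l i 0 - 1)
      | none => offset
    let offset := match output_paddings with    -- 'if output_paddings:'
      | some l => if l = [] then offset else offset + PySem.List.pyGetD l i 0
      | none => offset
    (out - 1) * PySem.List.pyGetD strides i 0 + offset) in_dim

-- ===== PORT B =====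
-- helper for Python's truthiness default: 'xs if xs else dflt'
def pvTruthyOr (o : Option (List Int)) (dflt : List Int) : List Int :=
  match o with
  | some l => if l = [] then dflt else l
  | none => dflt

def conv_transpose_dim_formula_alt (in_dim : Int) (kernels : List Int) (paddings : List Int) (strides : List Int) (dilations : Option (List Int)) (output_paddings : Option (List Int)) : Int :=
  let n := kernels.length
  let dil := pvTruthyOr dilations (List.replicate n (1 : Int))
  let opad := pvTruthyOr output_paddings (List.replicate n (0 : Int))
  let z := (kernels.zip paddings).zip (strides.zip (dil.zip opad))
  let pa := z.reverse.foldl (fun (pa : Int × Int) t =>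
      (pa.1 * t.2.1,
       pa.2 + (-2 * t.1.2 + t.1.1 + (t.1.1 - 1) * (t.2.2.1 - 1) + t.2.2.2 - t.2.1) * pa.1)) (1, 0)
  in_dim * pa.1 + pa.2

-- ===== PRECONDITION & SPEC =====
-- Pre_ excludes exactly the inputs on which A raises IndexError: a paddings/strides list shorter
-- than kernels, or a truthy (non-empty) dilations/output_paddings list shorter than kernels.
def Pre_conv_transpose_dim_formula (in_dim : Int) (kernels : List Int) (paddings : List Int) (strides : List Int) (dilations : Option (List Int)) (output_paddings : Option (List Int)) : Prop :=
  kernels.length ≤ paddings.length ∧ kernels.length ≤ strides.length ∧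
  (dilations.getD [] ≠ [] → kernels.length ≤ (dilations.getD []).length) ∧
  (output_paddings.getD [] ≠ [] → kernels.length ≤ (output_paddings.getD []).length)
instance (in_dim : Int) (kernels : List Int) (paddings : List Int) (strides : List Int) (dilations : Option (List Int)) (output_paddings : Option (List Int)) : Decidable (Pre_conv_transpose_dim_formula in_dim kernels paddings strides dilations output_paddings) := by unfold Pre_conv_transpose_dim_formula; infer_instance

def pvWitness_conv_transpose_dim_formula : Int × List Int × List Int × List Int × Option (List Int) × Option (List Int) :=
  (10, [4, 4], [1, 1], [2, 2], some [1, 2], none)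

def Spec_conv_transpose_dim_formula (in_dim : Int) (kernels : List Int) (paddings : List Int) (strides : List Int) (dilations : Option (List Int)) (output_paddings : Option (List Int)) (out : Int) : Prop := out = conv_transpose_dim_formula_alt in_dim kernels paddings strides dilations output_paddings
instance (in_dim : Int) (kernels : List Int) (paddings : List Int) (strides : List Int) (dilations : Option (List Int)) (output_paddings : Option (List Int)) (out : Int) : Decidable (Spec_conv_transpose_dim_formula in_dim kernels paddings strides dilations output_paddings out) := by unfold Spec_conv_transpose_dim_formula; infer_instance

-- ===== CLAIM (what is proved, stated in full; the proofs are below) =====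
def Claim_equal_conv_transpose_dim_formula : Prop := ∀ (in_dim : Int) (kernels : List Int) (paddings : List Int) (strides : List Int) (dilations : Option (List Int)) (output_paddings : Option (List Int)), Dom_conv_transpose_dim_formula in_dim kernels paddings strides dilations output_paddings → Pre_conv_transpose_dim_formula in_dim kernels paddings strides dilations output_paddings → Spec_conv_transpose_dim_formula in_dim kernels paddings strides dilations output_paddings (conv_transpose_dim_formula in_dim kernels paddings strides dilations output_paddings)

-- ===== LEMMAS AND PROOFS =====

-- common forward recurrence over the zipped layer data ((k, p), (s, (d, op)))
def pvFwd : Int → List ((Int × Int) × Int × Int × Int) → Int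
  | x, [] => x
  | x, ((k, p), s, d, op) :: rest =>
      pvFwd ((x - 1) * s + (-2 * p + k + (k - 1) * (d - 1) + op)) rest

-- B's reverse scan computes pvFwd
lemma pvB_eq_fwd (z : List ((Int × Int) × Int × Int × Int)) (x : Int) :
    x * (z.reverse.foldl (fun (pa : Int × Int) t =>
      (pa.1 * t.2.1,
       pa.2 + (-2 * t.1.2 + t.1.1 + (t.1.1 - 1) * (t.2.2.1 - 1) + t.2.2.2 - t.2.1) * pa.1)) (1, 0)).1
    + (z.reverse.foldl (fun (pa : Int × Int) t =>
      (pa.1 * t.2.1,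
       pa.2 + (-2 * t.1.2 + t.1.1 + (t.1.1 - 1) * (t.2.2.1 - 1) + t.2.2.2 - t.2.1) * pa.1)) (1, 0)).2
    = pvFwd x z := by
  induction z generalizing x with
  | nil => simp [pvFwd]
  | cons t rest ih =>
    obtain ⟨⟨k, p⟩, s, d, op⟩ := t
    simp only [List.reverse_cons, List.foldl_append, List.foldl_cons, List.foldl_nil, pvFwd]
    rw [← ih ((x - 1) * s + (-2 * p + k + (k - 1) * (d - 1) + op))]
    ring

-- index shift for the range fold
lemma pvShift (h : Int → Int → Int) (x b : Int) :
    (PySem.List.pyRange 1 (b + 1) 1).foldl h x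
      = (PySem.List.pyRange 0 b 1).foldl (fun a i => h a (i + 1)) x := by
  rw [PySem.List.pyRange_one 1 (b + 1), PySem.List.pyRange_one 0 b]
  simp only [add_sub_cancel_right, Int.sub_zero, List.foldl_map]
  apply PySem.List.foldl_congr_mem
  intro acc k _
  congr 1
  omega

lemma pvGetD_cons_succ (a : Int) (l : List Int) (i : Int) (hi : 0 ≤ i) :
    PySem.List.pyGetD (a :: l) (i + 1) 0 = PySem.List.pyGetD l i 0 := by
  rw [PySem.List.pyGetD_of_nonneg (h := by omega), PySem.List.pyGetD_of_nonneg (h := hi)]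
  have : (i + 1).toNat = i.toNat + 1 := by omega
  simp [this]

-- A's indexed fold (with all four lists materialised) computes pvFwd
lemma pvA_eq_fwd (ks ps ss ds os : List Int) (x : Int)
    (hp : ks.length ≤ ps.length) (hs : ks.length ≤ ss.length)
    (hd : ks.length ≤ ds.length) (ho : ks.length ≤ os.length) :
    (PySem.List.pyRange 0 (ks.length : Int) 1).foldl (fun out i =>
        (out - 1) * PySem.List.pyGetD ss i 0 +
          (-2 * PySem.List.pyGetD ps i 0 + PySem.List.pyGetD ks i 0 +
            (PySem.List.pyGetD ks i 0 - 1) * (PySem.List.pyGetD ds i 0 - 1) +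
            PySem.List.pyGetD os i 0)) x
      = pvFwd x ((ks.zip ps).zip (ss.zip (ds.zip os))) := by
  induction ks generalizing ps ss ds os x with
  | nil => simp [PySem.List.pyRange_one_eq_nil, pvFwd]
  | cons k ks ih =>
    obtain ⟨p, ps, rfl⟩ : ∃ p ps', ps = p :: ps' := by
      cases ps with | nil => simp at hp | cons a b => exact ⟨a, b, rfl⟩
    obtain ⟨s, ss, rfl⟩ : ∃ s ss', ss = s :: ss' := by
      cases ss with | nil => simp at hs | cons a b => exact ⟨a, b, rfl⟩
    obtain ⟨d, ds, rfl⟩ : ∃ d ds', ds = d :: ds' := by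
      cases ds with | nil => simp at hd | cons a b => exact ⟨a, b, rfl⟩
    obtain ⟨o, os, rfl⟩ : ∃ o os', os = o :: os' := by
      cases os with | nil => simp at ho | cons a b => exact ⟨a, b, rfl⟩
    simp only [List.length_cons] at hp hs hd ho ⊢
    have hcons : PySem.List.pyRange 0 ((ks.length : Int) + 1) 1
        = 0 :: PySem.List.pyRange 1 ((ks.length : Int) + 1) 1 := by
      rw [PySem.List.pyRange_one_cons (by positivity)]; norm_num
    push_cast
    rw [hcons]
    simp only [List.foldl_cons, PySem.List.pyGetD_zero_cons]
    rw [pvShift]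
    refine (PySem.List.foldl_congr_mem _ _ (fun out i =>
        (out - 1) * PySem.List.pyGetD ss i 0 +
          (-2 * PySem.List.pyGetD ps i 0 + PySem.List.pyGetD ks i 0 +
            (PySem.List.pyGetD ks i 0 - 1) * (PySem.List.pyGetD ds i 0 - 1) +
            PySem.List.pyGetD os i 0)) _ ?_).trans ?_
    · intro acc i hi
      have h0 : 0 ≤ i := (PySem.List.mem_pyRange_one.mp hi).1
      rw [pvGetD_cons_succ _ _ _ h0, pvGetD_cons_succ _ _ _ h0, pvGetD_cons_succ _ _ _ h0,
          pvGetD_cons_succ _ _ _ h0, pvGetD_cons_succ _ _ _ h0]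
    · rw [ih ps ss ds os _ (by omega) (by omega) (by omega) (by omega)]
      simp [pvFwd]

lemma pvGetD_replicate (n : Nat) (c i : Int) (h0 : 0 ≤ i) (hn : i < n) :
    PySem.List.pyGetD (List.replicate n c) i 0 = c := by
  rw [PySem.List.pyGetD_of_nonneg (h := h0)]
  rw [List.getD_eq_getElem?_getD, List.getElem?_replicate]
  have : i.toNat < n := by omega
  simp [this]

-- ===== VERDICT (by name: the statement is the Claim_ definition above) =====
theorem conv_transpose_dim_formula_spec : Claim_equal_conv_transpose_dim_formula := by
  intro in_dim kernels paddings strides dilations output_paddings _ hpre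
  obtain ⟨hp, hs, hd, ho⟩ := hpre
  have hdlen : kernels.length ≤ (pvTruthyOr dilations (List.replicate kernels.length 1)).length := by
    cases dilations with
    | none => simp [pvTruthyOr]
    | some l =>
      simp only [Option.getD_some] at hd
      by_cases hl : l = [] <;> simp [pvTruthyOr, hl]
      exact hd hl
  have holen : kernels.length ≤ (pvTruthyOr output_paddings (List.replicate kernels.length 0)).length := by
    cases output_paddings with
    | none => simp [pvTruthyOr]
    | some l =>
      simp only [Option.getD_some] at ho
      by_cases hl : l = [] <;> simp [pvTruthyOr, hl]
      exact ho hl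
  unfold Spec_conv_transpose_dim_formula
  simp only [conv_transpose_dim_formula, conv_transpose_dim_formula_alt]
  rw [pvB_eq_fwd ((kernels.zip paddings).zip (strides.zip
        ((pvTruthyOr dilations (List.replicate kernels.length 1)).zip
          (pvTruthyOr output_paddings (List.replicate kernels.length 0))))) in_dim]
  rw [← pvA_eq_fwd kernels paddings strides
        (pvTruthyOr dilations (List.replicate kernels.length 1))
        (pvTruthyOr output_paddings (List.replicate kernels.length 0))
        in_dim hp hs hdlen holen]
  apply PySem.List.foldl_congr_mem
  intro acc i hi
  have h0 : 0 ≤ i := (PySem.List.mem_pyRange_one.mp hi).1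
  have h1 : i < (kernels.length : Int) := (PySem.List.mem_pyRange_one.mp hi).2
  have hrep1 := pvGetD_replicate kernels.length 1 i h0 h1
  have hrep0 := pvGetD_replicate kernels.length 0 i h0 h1
  cases dilations with
  | none =>
    cases output_paddings with
    | none => simp [pvTruthyOr, hrep1, hrep0]
    | some lo =>
      by_cases hlo : lo = [] <;> simp [pvTruthyOr, hlo, hrep1, hrep0]
  | some ld =>
    cases output_paddings with
    | none =>
      by_cases hld : ld = [] <;> simp [pvTruthyOr, hld, hrep1, hrep0]
    | some lo =>
      by_cases hld : ld = [] <;> by_cases hlo : lo = [] <;>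
        simp [pvTruthyOr, hld, hlo, hrep1, hrep0]
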